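-- pv_equiv track=rewrite | github.com/w9/google-foobar | 03_03_queue_to_do/solution.py | answer
-- ===== SOURCE A (Python) =====
-- def xor_sum(n):
--     """
--     0 ^ 1 ^ ... ^ (n - 1)
--
--     Note that xor_sum(0) == 0.
--     """
--     if n % 4 == 0:
--         return 0
--     elif n % 4 == 1:
--         return (n - 1)
--     elif n % 4 == 2:
--         return 1
--     else:
--         return n
--
-- def answer(start, length):
--     """
--     The speed-up trick is:
--
--         k ^ (k+1) ^ ... ^ n   =   (0 ^ 1 ^ ... ^ n) ^ (0 ^ 1 ^ ... ^ (k-1))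
--
--     where (0 ^ 1 ^ ... ^ n) can be calculated fast.
--     """
--     current = start
--     acc = 0
--     for i in range(length):
--         line_start = start + i * length
--         line_end = line_start + (length - i)
--         acc ^= xor_sum(line_end) ^ xor_sum(line_start)
--
--     return acc
-- ===== SOURCE B (Python) =====
-- def answer(start, length):
--     # Per row, XOR the region directly using pairing: strip an odd low bound
--     # and an odd high bound, then each remaining pair (2t, 2t+1) XORs to 1,
--     # so only the parity of the pair count matters. No prefix-XOR helper.
--     acc = 0
--     for i in range(length):
--         lo = start + i * length
--         hi = lo + (length - i)
--         if lo % 2: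
--             acc ^= lo
--             lo += 1
--         if hi % 2:
--             hi -= 1
--             acc ^= hi
--         acc ^= ((hi - lo) // 2) % 2
--     return acc
-- ===== Notes on version B (the rewrite author's own statement) =====
-- stated objective: alternative
-- what changed: Dropped the xor_sum prefix-XOR mod-4 helper; B XORs each row's interval directly by stripping odd boundary values and adding the parity of the count of (even,odd) pairs, each of which XORs to 1.
import Mathlib
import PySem

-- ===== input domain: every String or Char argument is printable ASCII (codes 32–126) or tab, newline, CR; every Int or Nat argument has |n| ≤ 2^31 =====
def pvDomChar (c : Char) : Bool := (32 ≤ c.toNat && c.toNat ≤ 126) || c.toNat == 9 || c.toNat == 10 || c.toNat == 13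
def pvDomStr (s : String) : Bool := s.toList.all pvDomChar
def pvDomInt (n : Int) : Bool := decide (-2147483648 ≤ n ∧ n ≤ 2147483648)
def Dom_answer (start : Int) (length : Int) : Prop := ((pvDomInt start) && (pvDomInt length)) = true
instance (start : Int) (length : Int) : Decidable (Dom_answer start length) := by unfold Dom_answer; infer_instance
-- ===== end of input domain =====

-- B drops A's xor_sum prefix-XOR mod-4 closed form: per row it strips odd
-- boundary values and adds the parity of the (even,odd)-pair count, each such
-- pair XORing to 1 (alternative algorithm, same cost).

-- ===== PORT A =====
-- xor_sum(n): mod-4 closed form for 0 ^ 1 ^ ... ^ (n-1)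
def xorSum (n : Int) : Int :=
  if PySem.Int.mod n 4 = 0 then 0
  else if PySem.Int.mod n 4 = 1 then n - 1
  else if PySem.Int.mod n 4 = 2 then 1
  else n

def answer (start : Int) (length : Int) : Int :=
  (PySem.List.pyRange 0 length 1).foldl (fun acc i =>
    let lineStart := start + i * length
    let lineEnd := lineStart + (length - i)
    PySem.Int.bxor acc (PySem.Int.bxor (xorSum lineEnd) (xorSum lineStart))) 0

-- ===== PORT B =====
def answer_alt (start : Int) (length : Int) : Int :=
  (PySem.List.pyRange 0 length 1).foldl (fun acc i =>
    let lo := start + i * length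
    let hi := lo + (length - i)
    let acc1 := if PySem.Int.mod lo 2 ≠ 0 then PySem.Int.bxor acc lo else acc
    let lo1 := if PySem.Int.mod lo 2 ≠ 0 then lo + 1 else lo
    let hi1 := if PySem.Int.mod hi 2 ≠ 0 then hi - 1 else hi
    let acc2 := if PySem.Int.mod hi 2 ≠ 0 then PySem.Int.bxor acc1 hi1 else acc1
    PySem.Int.bxor acc2 (PySem.Int.mod (PySem.Int.floordiv (hi1 - lo1) 2) 2)) 0

-- ===== PRECONDITION & SPEC =====
def Spec_answer (start : Int) (length : Int) (out : Int) : Prop := out = answer_alt start length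
instance (start : Int) (length : Int) (out : Int) : Decidable (Spec_answer start length out) := by unfold Spec_answer; infer_instance

-- ===== CLAIM (what is proved, stated in full; the proofs are below) =====
def Claim_equal_answer : Prop := ∀ (start : Int) (length : Int), Dom_answer start length → Spec_answer start length (answer start length)

-- ===== LEMMAS AND PROOFS =====

-- bxor on the two Int constructors, reduced to Nat xor
theorem bxor_ofNat_ofNat (m n : Nat) :
    PySem.Int.bxor (Int.ofNat m) (Int.ofNat n) = Int.ofNat (m ^^^ n) := by
  simp [PySem.Int.bxor]

theorem bxor_ofNat_negSucc (m n : Nat) :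
    PySem.Int.bxor (Int.ofNat m) (Int.negSucc n) = Int.negSucc (m ^^^ n) := by
  have h0 : (0:Int) ≤ Int.ofNat m := Int.natCast_nonneg m
  have h1 : ¬ (0:Int) ≤ Int.negSucc n := by simp [Int.negSucc_eq]; omega
  simp only [PySem.Int.bxor]
  rw [if_pos h0, if_neg h1]
  have h2 : (-(Int.negSucc n) - 1) = (n : Int) := by simp [Int.negSucc_eq]
  rw [h2, Int.toNat_natCast]
  have h3 : (Int.ofNat m).toNat = m := rfl
  rw [h3, Int.negSucc_eq]
  ring

theorem bxor_negSucc_ofNat (m n : Nat) :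
    PySem.Int.bxor (Int.negSucc m) (Int.ofNat n) = Int.negSucc (m ^^^ n) := by
  rw [PySem.Int.bxor_comm, bxor_ofNat_negSucc, Nat.xor_comm]

theorem bxor_negSucc_negSucc (m n : Nat) :
    PySem.Int.bxor (Int.negSucc m) (Int.negSucc n) = Int.ofNat (m ^^^ n) := by
  have h1 : ¬ (0:Int) ≤ Int.negSucc m := by simp [Int.negSucc_eq]; omega
  have h2 : ¬ (0:Int) ≤ Int.negSucc n := by simp [Int.negSucc_eq]; omega
  simp only [PySem.Int.bxor]
  rw [if_neg h1, if_neg h2]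
  have e1 : (-(Int.negSucc m) - 1) = (m : Int) := by simp [Int.negSucc_eq]
  have e2 : (-(Int.negSucc n) - 1) = (n : Int) := by simp [Int.negSucc_eq]
  rw [e1, e2, Int.toNat_natCast, Int.toNat_natCast]
  rfl

theorem bxor_assoc' (a b c : Int) :
    PySem.Int.bxor (PySem.Int.bxor a b) c = PySem.Int.bxor a (PySem.Int.bxor b c) := by
  cases a <;> cases b <;> cases c <;>
    simp only [bxor_ofNat_ofNat, bxor_ofNat_negSucc, bxor_negSucc_ofNat, bxor_negSucc_negSucc] <;>
    rw [Nat.xor_assoc]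

theorem bxor_rot (x u v : Int) :
    PySem.Int.bxor (PySem.Int.bxor x u) v = PySem.Int.bxor (PySem.Int.bxor x v) u := by
  rw [bxor_assoc', bxor_assoc', PySem.Int.bxor_comm u v]

-- small Nat xor facts
theorem nat_xor_even_succ (k : Nat) : (2*k) ^^^ (2*k+1) = 1 := by
  apply Nat.eq_of_testBit_eq
  intro i
  cases i with
  | zero =>
    rw [Nat.testBit_xor]
    have e1 : (2*k)%2 = 0 := by omega
    have e2 : (2*k+1)%2 = 1 := by omega
    simp [Nat.testBit_zero, e1, e2]
  | succ j =>
    rw [Nat.testBit_xor]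
    simp only [Nat.testBit_succ]
    have h1 : (2*k)/2 = k := by omega
    have h2 : (2*k+1)/2 = k := by omega
    rw [h1, h2]; simp

theorem nat_one_xor_even (k : Nat) : 1 ^^^ (2*k) = 2*k+1 := by
  apply Nat.eq_of_testBit_eq
  intro i
  cases i with
  | zero =>
    rw [Nat.testBit_xor]
    have e1 : (2*k)%2 = 0 := by omega
    have e2 : (2*k+1)%2 = 1 := by omega
    simp [Nat.testBit_zero, e1, e2]
  | succ j =>
    rw [Nat.testBit_xor]
    simp only [Nat.testBit_succ]
    have h1 : (2*k)/2 = k := by omega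
    have h2 : (2*k+1)/2 = k := by omega
    rw [h1, h2]; simp

theorem nat_one_xor_odd (k : Nat) : 1 ^^^ (2*k+1) = 2*k := by
  apply Nat.eq_of_testBit_eq
  intro i
  cases i with
  | zero =>
    rw [Nat.testBit_xor]
    have e1 : (2*k)%2 = 0 := by omega
    have e2 : (2*k+1)%2 = 1 := by omega
    simp [Nat.testBit_zero, e1, e2]
  | succ j =>
    rw [Nat.testBit_xor]
    simp only [Nat.testBit_succ]
    have h1 : (2*k)/2 = k := by omega
    have h2 : (2*k+1)/2 = k := by omega
    rw [h1, h2]; simp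

-- For odd m: (m-1) ^ m = 1
theorem bxor_pred_self_of_odd (m : Int) (h : m % 2 = 1) : PySem.Int.bxor (m - 1) m = 1 := by
  cases m with
  | ofNat n =>
    rw [Int.ofNat_eq_natCast] at h
    have hn : n % 2 = 1 := by omega
    obtain ⟨k, hk⟩ : ∃ k, n = 2 * k + 1 := ⟨n / 2, by omega⟩
    subst hk
    have hm : (Int.ofNat (2 * k + 1)) - 1 = Int.ofNat (2 * k) := by
      simp [Int.ofNat_eq_natCast]
    rw [hm, bxor_ofNat_ofNat, nat_xor_even_succ]
    rfl
  | negSucc n =>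
    have hn : n % 2 = 0 := by
      have := Int.negSucc_eq n
      omega
    obtain ⟨k, hk⟩ : ∃ k, n = 2 * k := ⟨n / 2, by omega⟩
    subst hk
    have hm : (Int.negSucc (2 * k)) - 1 = Int.negSucc (2 * k + 1) := by
      simp [Int.negSucc_eq]; ring
    rw [hm, bxor_negSucc_negSucc, Nat.xor_comm, nat_xor_even_succ]
    rfl

-- For even m: 1 ^ m = m + 1
theorem bxor_one_of_even (m : Int) (h : m % 2 = 0) : PySem.Int.bxor 1 m = m + 1 := by
  cases m with
  | ofNat n =>
    rw [Int.ofNat_eq_natCast] at h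
    have hn : n % 2 = 0 := by omega
    obtain ⟨k, hk⟩ : ∃ k, n = 2 * k := ⟨n / 2, by omega⟩
    subst hk
    have h1 : (1 : Int) = Int.ofNat 1 := rfl
    rw [h1, bxor_ofNat_ofNat, nat_one_xor_even]
    simp [Int.ofNat_eq_natCast]
  | negSucc n =>
    have hn : n % 2 = 1 := by
      have := Int.negSucc_eq n
      omega
    obtain ⟨k, hk⟩ : ∃ k, n = 2 * k + 1 := ⟨n / 2, by omega⟩
    subst hk
    have h1 : (1 : Int) = Int.ofNat 1 := rfl
    rw [h1, bxor_ofNat_negSucc, nat_one_xor_odd]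
    simp [Int.negSucc_eq]

-- the key step behind A's trick: xor_sum(m+1) = xor_sum(m) ^ m
theorem xorSum_succ (m : Int) : xorSum (m + 1) = PySem.Int.bxor (xorSum m) m := by
  have hm : PySem.Int.mod m 4 = m % 4 := PySem.Int.mod_eq_emod_of_pos (by norm_num)
  have hm1 : PySem.Int.mod (m + 1) 4 = (m + 1) % 4 := PySem.Int.mod_eq_emod_of_pos (by norm_num)
  have hcases : m % 4 = 0 ∨ m % 4 = 1 ∨ m % 4 = 2 ∨ m % 4 = 3 := by omega
  unfold xorSum
  rw [hm, hm1]
  rcases hcases with h | h | h | h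
  · have h' : (m + 1) % 4 = 1 := by omega
    rw [h, h']
    norm_num
    rw [PySem.Int.bxor_comm, PySem.Int.bxor_zero]
  · have h' : (m + 1) % 4 = 2 := by omega
    rw [h, h']
    norm_num
    rw [bxor_pred_self_of_odd m (by omega)]
  · have h' : (m + 1) % 4 = 3 := by omega
    rw [h, h']
    norm_num
    rw [bxor_one_of_even m (by omega)]
  · have h' : (m + 1) % 4 = 0 := by omega
    rw [h, h']
    norm_num

-- one row: XORing the block of n consecutive values starting at a equals
-- xor_sum(a+n) ^ xor_sum(a), folded into any accumulator
theorem row_eq (n : Nat) (a acc : Int) :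
    (PySem.List.pyRange 0 (n : Int) 1).foldl
      (fun acc2 j => PySem.Int.bxor acc2 (a + j)) acc
    = PySem.Int.bxor acc (PySem.Int.bxor (xorSum (a + n)) (xorSum a)) := by
  induction n generalizing acc with
  | zero =>
    simp [PySem.List.pyRange]
  | succ n ih =>
    have hstep : ((n + 1 : Nat) : Int) = (n : Int) + 1 := by push_cast; ring
    rw [hstep, PySem.List.pyRange_one_succ_right (by positivity), List.foldl_append]
    simp only [List.foldl]
    rw [ih]
    have hx : a + ((n : Int) + 1) = (a + (n : Int)) + 1 := by ring
    rw [hx, xorSum_succ]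
    rw [bxor_assoc', bxor_assoc']
    congr 1
    rw [PySem.Int.bxor_comm (xorSum a) (a + (n : Int)), ← bxor_assoc']

-- the fold of one row, as a function of its start, length and accumulator
def ixor (a : Int) (n : Nat) (acc : Int) : Int :=
  (PySem.List.pyRange 0 (n : Int) 1).foldl (fun acc2 j => PySem.Int.bxor acc2 (a + j)) acc

theorem ixor_eq_foldl (a : Int) (n : Nat) (acc : Int) :
    ixor a n acc
      = (PySem.List.pyRange 0 (n : Int) 1).foldl (fun acc2 j => PySem.Int.bxor acc2 (a + j)) acc := rfl

theorem ixor_zero (a acc : Int) : ixor a 0 acc = acc := by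
  simp [ixor, PySem.List.pyRange]

theorem ixor_succ (a : Int) (n : Nat) (acc : Int) :
    ixor a (n + 1) acc = PySem.Int.bxor (ixor a n acc) (a + n) := by
  unfold ixor
  have hstep : ((n + 1 : Nat) : Int) = (n : Int) + 1 := by push_cast; ring
  rw [hstep, PySem.List.pyRange_one_succ_right (by positivity), List.foldl_append]
  simp only [List.foldl]

theorem ixor_cons (a : Int) (n : Nat) (acc : Int) :
    ixor a (n + 1) acc = ixor (a + 1) n (PySem.Int.bxor acc a) := by
  induction n with
  | zero =>
    rw [ixor_succ, ixor_zero, ixor_zero]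
    norm_num
  | succ n ih =>
    rw [ixor_succ, ih, ixor_succ]
    congr 1
    push_cast
    ring

-- an (even, odd) pair XORs to 1
theorem bxor_pair (m : Int) (h : m % 2 = 0) : PySem.Int.bxor m (m + 1) = 1 := by
  have := bxor_pred_self_of_odd (m + 1) (by omega)
  simpa using this

-- a block of pairs starting at an even value contributes the parity of the pair count
theorem ixor_pairs (k : Nat) (a acc : Int) (h : a % 2 = 0) :
    ixor a (2 * k) acc = PySem.Int.bxor acc ((k : Int) % 2) := by
  induction k with
  | zero =>
    rw [ixor_zero]
    norm_num
  | succ k ih =>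
    have h2 : 2 * (k + 1) = (2 * k + 1) + 1 := by omega
    rw [h2, ixor_succ, ixor_succ, ih]
    have hc : a + ((2 * k + 1 : Nat) : Int) = (a + (2 * k : Nat)) + 1 := by push_cast; ring
    rw [hc, bxor_assoc', bxor_pair (a + ((2 * k : Nat) : Int)) (by push_cast; omega)]
    rw [bxor_assoc']
    congr 1
    rcases Nat.even_or_odd k with he | ho
    · have e1 : ((k : Nat) : Int) % 2 = 0 := by obtain ⟨t, ht⟩ := he; omega
      have e2 : ((k + 1 : Nat) : Int) % 2 = 1 := by obtain ⟨t, ht⟩ := he; push_cast; omega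
      rw [e1, e2, PySem.Int.bxor_comm, PySem.Int.bxor_zero]
    · have e1 : ((k : Nat) : Int) % 2 = 1 := by obtain ⟨t, ht⟩ := ho; omega
      have e2 : ((k + 1 : Nat) : Int) % 2 = 0 := by obtain ⟨t, ht⟩ := ho; push_cast; omega
      rw [e1, e2]
      exact PySem.Int.bxor_self 1

-- B's per-row computation equals the fold over the row
theorem brow_eq (lo hi acc : Int) (h : lo < hi) :
    PySem.Int.bxor
      (if PySem.Int.mod hi 2 ≠ 0
        then PySem.Int.bxor (if PySem.Int.mod lo 2 ≠ 0 then PySem.Int.bxor acc lo else acc)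
              (if PySem.Int.mod hi 2 ≠ 0 then hi - 1 else hi)
        else (if PySem.Int.mod lo 2 ≠ 0 then PySem.Int.bxor acc lo else acc))
      (PySem.Int.mod
        (PySem.Int.floordiv
          ((if PySem.Int.mod hi 2 ≠ 0 then hi - 1 else hi) -
            (if PySem.Int.mod lo 2 ≠ 0 then lo + 1 else lo)) 2) 2)
    = ixor lo ((hi - lo).toNat) acc := by
  have hml : PySem.Int.mod lo 2 = lo % 2 := PySem.Int.mod_eq_emod_of_pos (by norm_num)
  have hmh : PySem.Int.mod hi 2 = hi % 2 := PySem.Int.mod_eq_emod_of_pos (by norm_num)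
  rw [hml, hmh]
  by_cases h1 : lo % 2 = 0 <;> by_cases h2 : hi % 2 = 0
  · -- both even
    simp only [h1, h2, if_neg (by omega : ¬ (0 : Int) ≠ 0)]
    rw [PySem.Int.floordiv_eq_ediv_of_pos (by norm_num),
        PySem.Int.mod_eq_emod_of_pos (by norm_num)]
    have hk : (hi - lo).toNat = 2 * ((hi - lo) / 2).toNat := by omega
    rw [hk, ixor_pairs _ lo acc h1]
    congr 1
    omega
  · -- lo even, hi odd: strip hi-1 on the right
    simp only [h1, if_neg (by omega : ¬ (0 : Int) ≠ 0), if_pos (by omega : hi % 2 ≠ 0)]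
    rw [PySem.Int.floordiv_eq_ediv_of_pos (by norm_num),
        PySem.Int.mod_eq_emod_of_pos (by norm_num)]
    have hn : (hi - lo).toNat = 2 * ((hi - 1 - lo) / 2).toNat + 1 := by omega
    rw [hn, ixor_succ, ixor_pairs _ lo acc h1]
    have hc : lo + ((2 * ((hi - 1 - lo) / 2).toNat : Nat) : Int) = hi - 1 := by omega
    rw [hc, bxor_rot]
    congr 2
    omega
  · -- lo odd, hi even: strip lo on the left
    simp only [h2, if_pos (by omega : lo % 2 ≠ 0), if_neg (by omega : ¬ (0 : Int) ≠ 0)]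
    rw [PySem.Int.floordiv_eq_ediv_of_pos (by norm_num),
        PySem.Int.mod_eq_emod_of_pos (by norm_num)]
    have hn : (hi - lo).toNat = 2 * ((hi - (lo + 1)) / 2).toNat + 1 := by omega
    rw [hn, ixor_cons, ixor_pairs _ (lo + 1) (PySem.Int.bxor acc lo) (by omega)]
    congr 1
    omega
  · -- both odd: strip lo and hi-1
    simp only [if_pos (by omega : lo % 2 ≠ 0), if_pos (by omega : hi % 2 ≠ 0)]
    rw [PySem.Int.floordiv_eq_ediv_of_pos (by norm_num),
        PySem.Int.mod_eq_emod_of_pos (by norm_num)]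
    have hge : lo + 2 ≤ hi := by omega
    have hn : (hi - lo).toNat = ((2 * ((hi - 1 - (lo + 1)) / 2).toNat) + 1) + 1 := by omega
    rw [hn, ixor_succ, ixor_cons, ixor_pairs _ (lo + 1) (PySem.Int.bxor acc lo) (by omega)]
    have hc : lo + (((2 * ((hi - 1 - (lo + 1)) / 2).toNat) + 1 : Nat) : Int) = hi - 1 := by
      push_cast; omega
    rw [hc, bxor_rot]
    congr 2
    omega

-- ===== VERDICT (by name: the statement is the Claim_ definition above) =====
theorem answer_spec : Claim_equal_answer := by
  intro start length _
  unfold Spec_answer answer answer_alt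
  apply Eq.symm
  apply PySem.List.foldl_congr_mem
  intro acc i hi
  have hmem := (PySem.List.mem_pyRange_one).mp hi
  simp only []
  have hlt : start + i * length < start + i * length + (length - i) := by omega
  rw [brow_eq (start + i * length) (start + i * length + (length - i)) acc hlt]
  rw [ixor_eq_foldl]
  rw [row_eq]
  rw [(by omega : ((start + i * length + (length - i) - (start + i * length)).toNat : Int)
      = length - i)]
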